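-- pv_equiv track=rewrite | github.com/kai9987kai/Supermix_29 | output/kaggle-upload/supermix-source/source/build_mega_conversation_dataset.py | _generate_bulk_socratic_seeds
-- ===== SOURCE A (Python) =====
-- from typing import Any, Dict, List, Tuple
--
-- def _generate_bulk_socratic_seeds(count: int = 1000) -> List[Tuple[str, str, str]]:
--     themes = [
--         "truth", "fairness", "freedom", "identity", "knowledge", "evidence",
--         "progress", "responsibility", "creativity", "intelligence",
--         "cooperation", "conflict", "trust", "power", "privacy",
--         "language", "meaning", "risk", "beauty", "wisdom",
--     ]
--     contexts = [
--         "in science", "in politics", "in friendship", "in education", "at work",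
--         "in technology", "in art", "in law", "in family life", "online",
--     ]
--     prompts = [
--         "What would count as a strong example of this?",
--         "Which assumption are you relying on most?",
--         "What case would challenge your current view?",
--         "How would you explain your answer to someone who disagrees?",
--         "What tradeoff might you be overlooking?",
--     ]
--     out: List[Tuple[str, str, str]] = []
--     for theme in themes:
--         for context in contexts:
--             for prompt in prompts:
--                 question = f"What does {theme} really mean {context}?"
--                 response = (
--                     f"Before answering, try defining {theme} in your own words {context}. "
--                     f"{prompt} Then ask whether your definition still works in an edge case."
--                 )
--                 insight = (
--                     f"This Socratic seed trains conceptual precision about {theme} {context} "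
--                     f"and encourages the learner to test assumptions against counterexamples."
--                 )
--                 out.append((question, response, insight))
--                 if len(out) >= count:
--                     return out
--     return out
-- ===== SOURCE B (Python) =====
-- from typing import List, Tuple
--
-- def _generate_bulk_socratic_seeds(count: int = 1000) -> List[Tuple[str, str, str]]:
--     themes = [
--         "truth", "fairness", "freedom", "identity", "knowledge", "evidence",
--         "progress", "responsibility", "creativity", "intelligence",
--         "cooperation", "conflict", "trust", "power", "privacy",
--         "language", "meaning", "risk", "beauty", "wisdom",
--     ]
--     contexts = [
--         "in science", "in politics", "in friendship", "in education", "at work",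
--         "in technology", "in art", "in law", "in family life", "online",
--     ]
--     prompts = [
--         "What would count as a strong example of this?",
--         "Which assumption are you relying on most?",
--         "What case would challenge your current view?",
--         "How would you explain your answer to someone who disagrees?",
--         "What tradeoff might you be overlooking?",
--     ]
--     out: List[Tuple[str, str, str]] = []
--     for i in range(1000):
--         theme = themes[i // 50]
--         context = contexts[(i // 5) % 10]
--         prompt = prompts[i % 5]
--         question = f"What does {theme} really mean {context}?"
--         response = (
--             f"Before answering, try defining {theme} in your own words {context}. "
--             f"{prompt} Then ask whether your definition still works in an edge case."
--         )
--         insight = (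
--             f"This Socratic seed trains conceptual precision about {theme} {context} "
--             f"and encourages the learner to test assumptions against counterexamples."
--         )
--         out.append((question, response, insight))
--         if len(out) >= count:
--             return out
--     return out
-- ===== Notes on version B (the rewrite author's own statement) =====
-- stated objective: alternative
-- what changed: Replaces the three nested for-loops over themes/contexts/prompts with a single flat loop over range(1000) that decodes the theme/context/prompt indices arithmetically (i//50, (i//5)%10, i%5), keeping the append-then-check early return.
import Mathlib
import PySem

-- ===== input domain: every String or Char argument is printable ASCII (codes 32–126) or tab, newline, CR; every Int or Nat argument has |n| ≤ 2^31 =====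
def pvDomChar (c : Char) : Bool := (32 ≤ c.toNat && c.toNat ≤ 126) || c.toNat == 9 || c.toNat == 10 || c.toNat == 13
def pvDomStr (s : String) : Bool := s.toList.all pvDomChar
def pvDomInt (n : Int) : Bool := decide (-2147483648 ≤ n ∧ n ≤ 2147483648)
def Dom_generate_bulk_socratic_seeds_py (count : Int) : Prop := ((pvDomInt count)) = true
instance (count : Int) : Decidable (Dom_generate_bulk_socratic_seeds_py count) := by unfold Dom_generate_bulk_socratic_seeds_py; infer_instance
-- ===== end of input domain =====

-- B replaces A's three nested loops with one flat loop over range(1000) decoding the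
-- theme/context/prompt indices arithmetically (alternative decomposition, same cost).

-- Shared literal data and the tuple construction (identical f-strings in both Pythons).
def pvThemes : List String :=
  ["truth", "fairness", "freedom", "identity", "knowledge", "evidence",
   "progress", "responsibility", "creativity", "intelligence",
   "cooperation", "conflict", "trust", "power", "privacy",
   "language", "meaning", "risk", "beauty", "wisdom"]

def pvContexts : List String :=
  ["in science", "in politics", "in friendship", "in education", "at work",
   "in technology", "in art", "in law", "in family life", "online"]

def pvPrompts : List String :=
  ["What would count as a strong example of this?",
   "Which assumption are you relying on most?",
   "What case would challenge your current view?",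
   "How would you explain your answer to someone who disagrees?",
   "What tradeoff might you be overlooking?"]

def pvMk (theme context prompt : String) : String × String × String :=
  ("What does " ++ theme ++ " really mean " ++ context ++ "?",
   "Before answering, try defining " ++ theme ++ " in your own words " ++ context ++ ". " ++
     prompt ++ " Then ask whether your definition still works in an edge case.",
   "This Socratic seed trains conceptual precision about " ++ theme ++ " " ++ context ++ " " ++
     "and encourages the learner to test assumptions against counterexamples.")

-- ===== PORT A =====
-- innermost loop over prompts; Bool = early `return` taken
def pvLoopPrompts (count : Int) (theme context : String) :
    List String → List (String × String × String) → Bool × List (String × String × String)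
  | [], out => (false, out)
  | p :: ps, out =>
    let out := out ++ [pvMk theme context p]
    if (out.length : Int) ≥ count then (true, out)
    else pvLoopPrompts count theme context ps out

def pvLoopContexts (count : Int) (theme : String) :
    List String → List (String × String × String) → Bool × List (String × String × String)
  | [], out => (false, out)
  | c :: cs, out =>
    match pvLoopPrompts count theme c pvPrompts out with
    | (true, out) => (true, out)
    | (false, out) => pvLoopContexts count theme cs out

def pvLoopThemes (count : Int) :
    List String → List (String × String × String) → Bool × List (String × String × String)
  | [], out => (false, out)
  | t :: ts, out =>
    match pvLoopContexts count t pvContexts out with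
    | (true, out) => (true, out)
    | (false, out) => pvLoopThemes count ts out

def generate_bulk_socratic_seeds_py (count : Int) : List (String × String × String) :=
  (pvLoopThemes count pvThemes []).2

-- ===== PORT B =====
-- themes[i//50], contexts[(i//5)%10], prompts[i%5]; the .getD "" default is never
-- reached (indexing is in range for every i in range(1000), where Python cannot raise).
def pvDecode (i : Int) : String × String × String :=
  ((PySem.List.pyGet? pvThemes (PySem.Int.floordiv i 50)).getD "",
   (PySem.List.pyGet? pvContexts (PySem.Int.mod (PySem.Int.floordiv i 5) 10)).getD "",
   (PySem.List.pyGet? pvPrompts (PySem.Int.mod i 5)).getD "")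

def pvAltLoop (count : Int) :
    List Int → List (String × String × String) → List (String × String × String)
  | [], out => out
  | i :: is, out =>
    let (theme, context, prompt) := pvDecode i
    let out := out ++ [pvMk theme context prompt]
    if (out.length : Int) ≥ count then out
    else pvAltLoop count is out

def generate_bulk_socratic_seeds_py_alt (count : Int) : List (String × String × String) :=
  pvAltLoop count (PySem.List.pyRange 0 1000 1) []

-- ===== PRECONDITION & SPEC =====
def Spec_generate_bulk_socratic_seeds_py (count : Int) (out : List (String × String × String)) : Prop := out = generate_bulk_socratic_seeds_py_alt count
instance (count : Int) (out : List (String × String × String)) : Decidable (Spec_generate_bulk_socratic_seeds_py count out) := by unfold Spec_generate_bulk_socratic_seeds_py; infer_instance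

-- ===== CLAIM (what is proved, stated in full; the proofs are below) =====
def Claim_equal_generate_bulk_socratic_seeds_py : Prop := ∀ (count : Int), Dom_generate_bulk_socratic_seeds_py count → Spec_generate_bulk_socratic_seeds_py count (generate_bulk_socratic_seeds_py count)

-- ===== LEMMAS AND PROOFS =====

-- generic append-then-check runner over an explicit item sequence
def pvGo (count : Int) :
    List (String × String × String) → List (String × String × String) →
    Bool × List (String × String × String)
  | [], out => (false, out)
  | x :: xs, out =>
    let out := out ++ [pvMk x.1 x.2.1 x.2.2]
    if (out.length : Int) ≥ count then (true, out)
    else pvGo count xs out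

theorem pvGo_append (count : Int) (xs ys : List (String × String × String))
    (out : List (String × String × String)) :
    pvGo count (xs ++ ys) out =
      match pvGo count xs out with
      | (true, o) => (true, o)
      | (false, o) => pvGo count ys o := by
  induction xs generalizing out with
  | nil => simp [pvGo]
  | cons x xs ih =>
    simp only [List.cons_append, pvGo]
    split_ifs with h
    · rfl
    · exact ih _

theorem pvLoopPrompts_eq_go (count : Int) (t c : String) (ps : List String)
    (out : List (String × String × String)) :
    pvLoopPrompts count t c ps out = pvGo count (ps.map (fun p => (t, c, p))) out := by
  induction ps generalizing out with
  | nil => rfl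
  | cons p ps ih =>
    simp only [pvLoopPrompts, List.map_cons, pvGo]
    split_ifs with h
    · rfl
    · exact ih _

theorem pvLoopContexts_eq_go (count : Int) (t : String) (cs : List String)
    (out : List (String × String × String)) :
    pvLoopContexts count t cs out =
      pvGo count (cs.flatMap (fun c => pvPrompts.map (fun p => (t, c, p)))) out := by
  induction cs generalizing out with
  | nil => rfl
  | cons c cs ih =>
    simp only [pvLoopContexts, List.flatMap_cons, pvGo_append, pvLoopPrompts_eq_go]
    cases h : pvGo count (pvPrompts.map (fun p => (t, c, p))) out with
    | mk b o => cases b <;> simp [ih]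

theorem pvLoopThemes_eq_go (count : Int) (ts : List String)
    (out : List (String × String × String)) :
    pvLoopThemes count ts out =
      pvGo count (ts.flatMap (fun t => pvContexts.flatMap
        (fun c => pvPrompts.map (fun p => (t, c, p))))) out := by
  induction ts generalizing out with
  | nil => rfl
  | cons t ts ih =>
    simp only [pvLoopThemes, List.flatMap_cons, pvGo_append, pvLoopContexts_eq_go]
    cases h : pvGo count (pvContexts.flatMap fun c => pvPrompts.map fun p => (t, c, p)) out with
    | mk b o => cases b <;> simp [ih]

theorem pvAltLoop_eq_go (count : Int) (is : List Int)
    (out : List (String × String × String)) :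
    pvAltLoop count is out = (pvGo count (is.map pvDecode) out).2 := by
  induction is generalizing out with
  | nil => rfl
  | cons i is ih =>
    simp only [pvAltLoop, List.map_cons, pvGo]
    split_ifs with h
    · rfl
    · exact ih _

-- the two item sequences are the same 1000 (theme, context, prompt) triples
set_option maxRecDepth 4000 in
theorem pvItems_eq :
    pvThemes.flatMap (fun t => pvContexts.flatMap
      (fun c => pvPrompts.map (fun p => (t, c, p)))) =
    (PySem.List.pyRange 0 1000 1).map pvDecode := by decide

-- ===== VERDICT (by name: the statement is the Claim_ definition above) =====
theorem generate_bulk_socratic_seeds_py_spec : Claim_equal_generate_bulk_socratic_seeds_py := by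
  intro count _
  unfold Spec_generate_bulk_socratic_seeds_py
  unfold generate_bulk_socratic_seeds_py generate_bulk_socratic_seeds_py_alt
  rw [pvLoopThemes_eq_go, pvAltLoop_eq_go, pvItems_eq]
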